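-- pv_equiv track=rewrite | github.com/piotrcurious/LFSR_PWM | lut_generators/multi/multi.py | berlekamp_massey
-- ===== SOURCE A (Python) =====
-- from typing import Dict, List, Tuple, Optional
--
-- def berlekamp_massey(bits: List[int]) -> int:
--     """Compute linear complexity (LC) using Berlekamp-Massey for a binary seq."""
--     n = len(bits)
--     b = [0] * n
--     c = [0] * n
--     b[0] = 1
--     c[0] = 1
--     l = 0
--     m = -1
--
--     for N in range(n):
--         d = 0
--         for i in range(l + 1):
--             d ^= c[i] & bits[N - i]
--         if d == 1:
--             t = c.copy()
--             p = N - m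
--             for i in range(n - p):
--                 c[i + p] ^= b[i]
--             if l <= N // 2:
--                 l = N + 1 - l
--                 m = N
--                 b = t
--     return l
-- ===== SOURCE B (Python) =====
-- def berlekamp_massey(bits):
--     """Compute linear complexity (LC) using Berlekamp-Massey for a binary seq."""
--     n = len(bits)
--     s = [x & 1 for x in bits]
--     # The linear complexity is the least l such that the defining linear system
--     # s[N] = c_1*s[N-1] + ... + c_l*s[N-l]  (N = l..n-1, over GF(2)) has a solution;
--     # solvability is monotone in l, so binary-search l and decide each system by
--     # online Gaussian elimination.
--     lo, hi = 0, n
--     while lo < hi: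
--         mid = (lo + hi) // 2
--         if _consistent(s, n, mid):
--             hi = mid
--         else:
--             lo = mid + 1
--     return lo
--
--
-- def _consistent(s, n, l):
--     """Is the GF(2) system for an LFSR of length l generating s solvable?"""
--     piv = [None] * l            # piv[p]: an augmented row whose leading bit is p
--     for N in range(l, n):
--         row = 0                 # bit i-1  <->  coefficient of c_i
--         for i in range(1, l + 1):
--             row |= s[N - i] << (i - 1)
--         rhs = s[N]
--         p = l - 1
--         while p >= 0:
--             if (row >> p) & 1 == 0:
--                 p -= 1
--             elif piv[p] is None:
--                 piv[p] = (row, rhs)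
--                 break
--             else:
--                 row ^= piv[p][0]
--                 rhs ^= piv[p][1]
--                 p -= 1
--         if p < 0 and rhs == 1:  # row reduced to 0 = 1: inconsistent
--             return False
--     return True
-- ===== Notes on version B (the rewrite author's own statement) =====
-- stated objective: alternative
-- what changed: Instead of Berlekamp-Massey's incremental connection-polynomial update, B computes the linear complexity as the least l for which the GF(2) linear system defining an l-tap LFSR over the sequence is solvable, deciding each candidate l by Gaussian elimination and binary-searching on l (solvability is monotone in l).
import Mathlib
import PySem

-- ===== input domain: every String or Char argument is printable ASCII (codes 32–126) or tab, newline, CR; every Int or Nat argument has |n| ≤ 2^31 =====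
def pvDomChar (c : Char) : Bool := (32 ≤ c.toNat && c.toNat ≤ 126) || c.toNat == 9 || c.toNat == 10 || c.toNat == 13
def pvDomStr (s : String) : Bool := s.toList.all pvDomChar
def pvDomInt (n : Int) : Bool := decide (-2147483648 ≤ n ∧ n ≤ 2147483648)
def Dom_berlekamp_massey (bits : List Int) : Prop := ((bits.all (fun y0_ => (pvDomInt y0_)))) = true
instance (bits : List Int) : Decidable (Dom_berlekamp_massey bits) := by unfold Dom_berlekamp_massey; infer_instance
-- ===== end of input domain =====

-- B replaces the incremental Berlekamp-Massey update by a different algorithm: the linear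
-- complexity is the least l for which the GF(2) linear system defining an l-tap LFSR is
-- solvable, so B binary-searches l and decides each system by Gaussian elimination.

-- ===== PORT A =====
-- A mutates only lists it allocates itself.  The indices i, N - i and i + p are provably
-- in range in every reachable state (see the proofs below), so reads are ported with
-- pyGetD and the update-loop write to c at i + p with List.set at (i + p).toNat (0 ≤ i + p there).
def bmAStep (bits : List Int) (n : Nat) (st : List Int × List Int × Int × Int) (N : Int) :
    List Int × List Int × Int × Int :=
  let b := st.1
  let c := st.2.1
  let l := st.2.2.1
  let m := st.2.2.2
  let d := (PySem.List.pyRange 0 (l + 1)).foldl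
      (fun d i => PySem.Int.bxor d
        (PySem.Int.band (PySem.List.pyGetD c i 0) (PySem.List.pyGetD bits (N - i) 0))) 0
  if d = 1 then
    let t := c
    let p := N - m
    let c2 := (PySem.List.pyRange 0 ((n : Int) - p)).foldl
        (fun c i => c.set (i + p).toNat
          (PySem.Int.bxor (PySem.List.pyGetD c (i + p) 0) (PySem.List.pyGetD b i 0))) c
    if l ≤ PySem.Int.floordiv N 2 then (t, c2, N + 1 - l, N) else (b, c2, l, m)
  else (b, c, l, m)

def berlekamp_massey (bits : List Int) : Int :=
  let n := bits.length
  -- setting element 0 of b and of c raises IndexError when n = 0; Pre_ excludes the empty list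
  let b := (List.replicate n (0 : Int)).set 0 1
  let c := (List.replicate n (0 : Int)).set 0 1
  ((PySem.List.pyRange 0 (n : Int)).foldl (bmAStep bits n) (b, c, 0, -1)).2.2.1

-- ===== PORT B =====
-- In Source B every value of s, row, rhs and the piv entries is a nonnegative int (s holds x & 1),
-- so they are carried as Nat, on which Python's | ^ << >> & are exact (Nat.||| ^^^ <<< >>> &&&).
-- The inner `while p >= 0` loop of _consistent, as a recursion on k = p + 1;
-- result is (piv, row, rhs, broke?) where broke? ↔ Python left the loop via break (p ≥ 0).
def bmReduce (piv : List (Option (Nat × Nat))) (row rhs : Nat) :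
    Nat → List (Option (Nat × Nat)) × Nat × Nat × Bool
  | 0 => (piv, row, rhs, false)
  | Nat.succ p =>
    if (row >>> p) &&& 1 = 0 then bmReduce piv row rhs p
    else
      match piv.getD p none with
      | none => (piv.set p (some (row, rhs)), row, rhs, true)
      | some (r2, y2) => bmReduce piv (row ^^^ r2) (rhs ^^^ y2) p

-- the `for N in range(l, n)` loop of _consistent, over the list of row indices
def bmConsRows (s : List Int) (l : Nat) (piv : List (Option (Nat × Nat))) :
    List Int → Bool
  | [] => true
  | N :: rest =>
      let row := (PySem.List.pyRange 1 ((l : Int) + 1)).foldl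
        (fun row i => row ||| ((PySem.List.pyGetD s (N - i) 0).toNat <<< (i - 1).toNat)) 0
      let rhs := (PySem.List.pyGetD s N 0).toNat
      let res := bmReduce piv row rhs l
      if !res.2.2.2 && res.2.2.1 = 1 then false else bmConsRows s l res.1 rest

def bmConsistent (s : List Int) (n l : Nat) : Bool :=
  bmConsRows s l (List.replicate l none) (PySem.List.pyRange (l : Int) (n : Int))

-- the `while lo < hi` binary search, as structural recursion on the fuel
-- fl = (hi - lo).toNat, which bounds the number of remaining iterations (the guard
-- only makes the same computation total: with enough fuel the `fl = 0` arm is unreachable)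
def bmSearch (s : List Int) (n : Nat) : Nat → Int → Int → Int
  | 0, lo, _ => lo
  | Nat.succ fl, lo, hi =>
    if lo < hi then
      let mid := PySem.Int.floordiv (lo + hi) 2
      if bmConsistent s n mid.toNat then bmSearch s n fl lo mid
      else bmSearch s n fl (mid + 1) hi
    else lo

def berlekamp_massey_alt (bits : List Int) : Int :=
  let n := bits.length
  let s := bits.map (fun x => PySem.Int.band x 1)
  bmSearch s n n 0 (n : Int)

-- ===== PRECONDITION & SPEC =====
-- A raises IndexError (assignment to element 0 of the empty b) on the empty list; that is the only input excluded.
def Pre_berlekamp_massey (bits : List Int) : Prop := bits ≠ []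
instance (bits : List Int) : Decidable (Pre_berlekamp_massey bits) := by
  unfold Pre_berlekamp_massey; infer_instance
def pvWitness_berlekamp_massey : List Int := [1, 0, 1]

def Spec_berlekamp_massey (bits : List Int) (out : Int) : Prop := out = berlekamp_massey_alt bits
instance (bits : List Int) (out : Int) : Decidable (Spec_berlekamp_massey bits out) := by
  unfold Spec_berlekamp_massey; infer_instance

-- ===== CLAIM (what is proved, stated in full; the proofs are below) =====
def Claim_equal_berlekamp_massey : Prop := ∀ (bits : List Int), Dom_berlekamp_massey bits →
  Pre_berlekamp_massey bits → Spec_berlekamp_massey bits (berlekamp_massey bits)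

-- ===== LEMMAS AND PROOFS =====

def nb (bits : List Int) (k : Nat) : Nat := (PySem.Int.band (bits.getD k 0) 1).toNat
def sb (bits : List Int) (k : Nat) : ZMod 2 := (nb bits k : ZMod 2)

def Sol (bits : List Int) (L N : Nat) : Prop :=
  ∃ t : Nat → ZMod 2, ∀ k, L ≤ k → k < N →
    sb bits k = ∑ i ∈ Finset.range L, t i * sb bits (k - 1 - i)

noncomputable def lcN (bits : List Int) : Nat := sInf {L | Sol bits L bits.length}

lemma z2_addZero : ∀ a b : ZMod 2, a + b = 0 ↔ a = b := by decide

lemma z2_addSelf : ∀ a : ZMod 2, a + a = 0 := by decide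

lemma nb_le_one (bits : List Int) (k : Nat) : nb bits k ≤ 1 := by
  unfold nb
  rw [PySem.Int.band_one]
  have h1 := PySem.Int.mod_nonneg (a := bits.getD k 0) (b := 2) (by omega)
  have h2 := PySem.Int.mod_lt (a := bits.getD k 0) (b := 2) (by omega)
  omega

lemma sol_vacuous (bits : List Int) (N : Nat) : Sol bits N N :=
  ⟨fun _ => 0, fun k hk hk2 => absurd hk (by omega)⟩

lemma sol_mono (bits : List Int) {L L' N : Nat} (h : L ≤ L') (hs : Sol bits L N) :
    Sol bits L' N := by
  obtain ⟨t, ht⟩ := hs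
  refine ⟨fun i => if i < L then t i else 0, fun k hk hk2 => ?_⟩
  rw [ht k (le_trans h hk) hk2]
  rw [← Finset.sum_subset (Finset.range_subset_range.2 h)]
  · exact Finset.sum_congr rfl (fun i hi => by simp [Finset.mem_range.1 hi])
  · intro i _ hi
    have hni : ¬ i < L := fun hlt => hi (Finset.mem_range.2 hlt)
    simp [hni]

lemma lcN_le_len (bits : List Int) : lcN bits ≤ bits.length :=
  Nat.sInf_le (sol_vacuous bits bits.length)

lemma lcN_sol (bits : List Int) : Sol bits (lcN bits) bits.length := by
  have h : {L | Sol bits L bits.length}.Nonempty := ⟨bits.length, sol_vacuous bits bits.length⟩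
  exact Nat.sInf_mem h

-- Massey's lower-bound lemma: a length-l generator of the first N terms with nonzero
-- discrepancy at term N forces every generator of the first N+1 terms to have ≥ N+1-l taps.
lemma massey (s : Nat → ZMod 2) (l N : Nat) (c : Nat → ZMod 2) (hc0 : c 0 = 1)
    (hgen : ∀ k, l ≤ k → k < N → ∑ i ∈ Finset.range (l + 1), c i * s (k - i) = 0)
    (hdisc : ∑ i ∈ Finset.range (l + 1), c i * s (N - i) = 1)
    (L : Nat) (t : Nat → ZMod 2)
    (hL : ∀ k, L ≤ k → k < N + 1 → s k = ∑ i ∈ Finset.range L, t i * s (k - 1 - i)) :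
    N + 1 ≤ L + l := by
  by_contra hcon
  have hLN : L + l ≤ N := by omega
  -- split hdisc: ∑_{j<l} c (j+1) * s (N-1-j) + s N = 1
  have hd2 : ∑ j ∈ Finset.range l, c (j + 1) * s (N - 1 - j) + s N = 1 := by
    rw [← hdisc, Finset.sum_range_succ']
    rw [Finset.sum_congr rfl (fun j hj => by
      show c (j + 1) * s (N - 1 - j) = c (j + 1) * s (N - (j + 1)); congr 2; omega)]
    rw [hc0, one_mul, Nat.sub_zero]
  -- hL expansion of s (N-1-j) for j < l
  have he1 : ∀ j, j < l → s (N - 1 - j) = ∑ i ∈ Finset.range L, t i * s (N - 2 - j - i) := by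
    intro j hj
    rw [hL (N - 1 - j) (by omega) (by omega)]
    exact Finset.sum_congr rfl (fun i hi => by congr 2; omega)
  -- hgen expansion of s (N-1-i) for i < L
  have he2 : ∀ i, i < L → s (N - 1 - i) = ∑ j ∈ Finset.range l, c (j + 1) * s (N - 2 - j - i) := by
    intro i hi
    have hg := hgen (N - 1 - i) (by omega) (by omega)
    rw [Finset.sum_range_succ'] at hg
    rw [Finset.sum_congr rfl (fun j hj => by
      show c (j + 1) * s (N - 1 - i - (j + 1)) = c (j + 1) * s (N - 2 - j - i)
      congr 2; omega)] at hg
    rw [hc0, one_mul, Nat.sub_zero] at hg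
    rw [add_comm, z2_addZero _ _] at hg
    exact hg
  -- the two expansions of s N
  have hsN : s N = ∑ i ∈ Finset.range L, t i *
      (∑ j ∈ Finset.range l, c (j + 1) * s (N - 2 - j - i)) := by
    rw [hL N (by omega) (by omega)]
    exact Finset.sum_congr rfl (fun i hi => by rw [he2 i (Finset.mem_range.1 hi)])
  have hsN2 : ∑ j ∈ Finset.range l, c (j + 1) *
      (∑ i ∈ Finset.range L, t i * s (N - 2 - j - i)) + s N = 1 := by
    rw [← hd2]
    congr 1
    exact Finset.sum_congr rfl (fun j hj => by rw [← he1 j (Finset.mem_range.1 hj)])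
  -- exchange the double sums: the two big sums are equal
  have hswap : ∑ i ∈ Finset.range L, t i * (∑ j ∈ Finset.range l, c (j + 1) * s (N - 2 - j - i))
      = ∑ j ∈ Finset.range l, c (j + 1) * (∑ i ∈ Finset.range L, t i * s (N - 2 - j - i)) := by
    simp only [Finset.mul_sum]
    rw [Finset.sum_comm]
    exact Finset.sum_congr rfl (fun j _ => Finset.sum_congr rfl (fun i _ => by ring)
      )
  have hz : (1 : ZMod 2) = 0 := by
    rw [← hsN2, ← hswap, ← hsN, z2_addSelf (s N)]
  exact absurd hz (by decide)

-- ===== A side =====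
def E01 (c : List Int) : Prop := ∀ j : Nat, c.getD j 0 = 0 ∨ c.getD j 0 = 1

def cf (c : List Int) (j : Nat) : ZMod 2 := if c.getD j 0 = 1 then 1 else 0

def z2i (a : ZMod 2) : Int := if a = 1 then 1 else 0

lemma pyRange_nil {a b : Int} (h : b ≤ a) : PySem.List.pyRange a b = [] := by
  simp [PySem.List.pyRange]
  omega

lemma band_one_eq_nb (bits : List Int) (k : Nat) :
    PySem.Int.band (bits.getD k 0) 1 = (nb bits k : Int) := by
  unfold nb
  have h := PySem.Int.band_one (bits.getD k 0)
  have h1 := PySem.Int.mod_nonneg (a := bits.getD k 0) (b := 2) (by omega)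
  omega

-- A's inner discrepancy loop computes z2i of the GF(2) discrepancy sum
lemma innerA (bits cA : List Int) (hE : E01 cA) (t : Nat) :
    ∀ k : Nat, k ≤ t + 1 →
    (PySem.List.pyRange 0 (k : Int)).foldl
      (fun d i => PySem.Int.bxor d
        (PySem.Int.band (PySem.List.pyGetD cA i 0) (PySem.List.pyGetD bits ((t : Int) - i) 0))) 0
      = z2i (∑ i ∈ Finset.range k, cf cA i * sb bits (t - i)) := by
  intro k
  induction k with
  | zero =>
      intro _
      rw [Nat.cast_zero, pyRange_nil (le_refl (0 : Int))]
      simp [z2i]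
  | succ k ih =>
      intro hk
      have h1 : ((k + 1 : Nat) : Int) = (k : Int) + 1 := by push_cast; ring
      rw [h1, PySem.List.pyRange_one_succ_right (by positivity), List.foldl_append,
        ih (by omega)]
      simp only [List.foldl_cons, List.foldl_nil]
      have e2 : ((t : Int) - (k : Int)) = ((t - k : Nat) : Int) := by omega
      rw [PySem.List.pyGetD_natCast, e2, PySem.List.pyGetD_natCast,
        Finset.sum_range_succ]
      rcases hE k with h0 | h0
      · rw [h0, PySem.Int.band_comm, PySem.Int.band_zero, PySem.Int.bxor_zero]
        have : cf cA k = 0 := by unfold cf; rw [h0]; norm_num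
        rw [this, zero_mul, add_zero]
      · rw [h0, PySem.Int.band_comm, PySem.Int.band_one, ← PySem.Int.band_one,
          band_one_eq_nb]
        have hcf : cf cA k = 1 := by unfold cf; rw [h0]; norm_num
        rw [hcf, one_mul]
        have hnb := nb_le_one bits (t - k)
        set S := ∑ i ∈ Finset.range k, cf cA i * sb bits (t - i)
        have : sb bits (t - k) = ((nb bits (t - k) : Nat) : ZMod 2) := rfl
        rw [this]
        interval_cases h : nb bits (t - k) <;>
          rcases (by decide : ∀ a : ZMod 2, a = 0 ∨ a = 1) S with hS | hS <;>
          rw [hS] <;> norm_num [z2i] <;> decide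

lemma sol_anti (bits : List Int) {L N N' : Nat} (h : N' ≤ N) (hs : Sol bits L N) :
    Sol bits L N' := by
  obtain ⟨t, ht⟩ := hs
  exact ⟨t, fun k hk hk2 => ht k hk (by omega)⟩

lemma gen_sol (bits c : List Int) (l N : Nat) (hc0 : cf c 0 = 1)
    (hgen : ∀ k, l ≤ k → k < N → ∑ i ∈ Finset.range (l + 1), cf c i * sb bits (k - i) = 0) :
    Sol bits l N := by
  refine ⟨fun i => cf c (i + 1), fun k hk hk2 => ?_⟩
  have hg := hgen k hk hk2
  rw [Finset.sum_range_succ'] at hg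
  rw [Finset.sum_congr rfl (fun i hi => by
    show cf c (i + 1) * sb bits (k - (i + 1)) = cf c (i + 1) * sb bits (k - 1 - i)
    congr 2; omega)] at hg
  rw [hc0, one_mul, add_comm, z2_addZero _ _] at hg
  simpa using hg

-- sum of a p-shifted 0-padded function
lemma sum_shift (f : Nat → ZMod 2) (p : Nat) :
    ∀ M : Nat, ∑ i ∈ Finset.range (p + M), (if p ≤ i then f (i - p) else 0)
      = ∑ j ∈ Finset.range M, f j := by
  intro M
  induction M with
  | zero =>
      rw [Nat.add_zero, Finset.range_zero, Finset.sum_empty]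
      exact Finset.sum_eq_zero (fun i hi => by
        rw [if_neg (by have := Finset.mem_range.1 hi; omega)])
  | succ M ih =>
      rw [show p + (M + 1) = (p + M) + 1 from rfl, Finset.sum_range_succ, ih,
        Finset.sum_range_succ, if_pos (by omega)]
      congr 2
      omega

-- A's update loop XORs b into c shifted by p = N - m, position by position. (operational)
lemma updA_partial (bA cA : List Int) (p : Int) (hp : 1 ≤ p) :
    ∀ k : Nat, p.toNat + k ≤ cA.length →
    ((PySem.List.pyRange 0 (k : Int)).foldl
        (fun c i => c.set (i + p).toNat
          (PySem.Int.bxor (PySem.List.pyGetD c (i + p) 0) (PySem.List.pyGetD bA i 0))) cA).length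
      = cA.length ∧
    ∀ j : Nat,
      ((PySem.List.pyRange 0 (k : Int)).foldl
        (fun c i => c.set (i + p).toNat
          (PySem.Int.bxor (PySem.List.pyGetD c (i + p) 0) (PySem.List.pyGetD bA i 0))) cA).getD j 0
      = if p.toNat ≤ j ∧ j < p.toNat + k then
          PySem.Int.bxor (cA.getD j 0) (bA.getD (j - p.toNat) 0)
        else cA.getD j 0 := by
  intro k
  induction k with
  | zero =>
      intro _
      rw [Nat.cast_zero, pyRange_nil (le_refl (0 : Int))]
      exact ⟨rfl, fun j => by rw [List.foldl_nil, if_neg (by omega)]⟩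
  | succ k ih =>
      intro hk
      obtain ⟨ihlen, ihget⟩ := ih (by omega)
      have h1 : ((k + 1 : Nat) : Int) = (k : Int) + 1 := by push_cast; ring
      rw [h1, PySem.List.pyRange_one_succ_right (by positivity), List.foldl_append]
      simp only [List.foldl_cons, List.foldl_nil]
      have e1 : ((k : Int) + p).toNat = p.toNat + k := by omega
      have e2 : ((k : Int) + p) = ((p.toNat + k : Nat) : Int) := by omega
      rw [e1, e2, PySem.List.pyGetD_natCast, PySem.List.pyGetD_natCast, ihget (p.toNat + k),
        if_neg (by omega)]
      refine ⟨by rw [List.length_set, ihlen], fun j => ?_⟩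
      rw [List.getD_eq_getElem?_getD, List.getElem?_set]
      by_cases hj : p.toNat + k = j
      · subst hj
        rw [if_pos rfl, if_pos (by rw [ihlen]; omega)]
        rw [if_pos (by omega)]
        simp only [Option.getD_some]
        congr 2
        omega
      · rw [if_neg hj, ← List.getD_eq_getElem?_getD, ihget j]
        by_cases h2 : p.toNat ≤ j ∧ j < p.toNat + k
        · rw [if_pos h2, if_pos (by omega)]
        · rw [if_neg h2, if_neg (by omega)]

-- ===== the A-side loop invariant =====
structure AInv (bits : List Int) (N : Nat) (st : List Int × List Int × Int × Int) : Prop where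
  hblen : st.1.length = bits.length
  hclen : st.2.1.length = bits.length
  hb01 : E01 st.1
  hc01 : E01 st.2.1
  hb0 : st.1.getD 0 0 = 1
  hc0 : st.2.1.getD 0 0 = 1
  hl0 : 0 ≤ st.2.2.1
  hlN : st.2.2.1 ≤ (N : Int)
  hm1 : -1 ≤ st.2.2.2
  hmN : st.2.2.2 < (N : Int)
  hml : st.2.2.2 = -1 → st.2.2.1 = 0
  hlpos : 0 ≤ st.2.2.2 → 1 ≤ st.2.2.1
  hlb0 : st.2.2.1 ≤ st.2.2.2 + 1
  hcdeg : ∀ j : Nat, st.2.2.1 < (j : Int) → st.2.1.getD j 0 = 0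
  hbdeg : ∀ j : Nat, st.2.2.2 + 1 - st.2.2.1 < (j : Int) → st.1.getD j 0 = 0
  hcgen : ∀ k : Nat, st.2.2.1.toNat ≤ k → k < N →
    ∑ i ∈ Finset.range (st.2.2.1.toNat + 1), cf st.2.1 i * sb bits (k - i) = 0
  hbgen : ∀ k : Nat, 0 ≤ st.2.2.2 → (st.2.2.2 + 1 - st.2.2.1).toNat ≤ k →
    k < st.2.2.2.toNat →
    ∑ i ∈ Finset.range ((st.2.2.2 + 1 - st.2.2.1).toNat + 1), cf st.1 i * sb bits (k - i) = 0
  hbdisc : 0 ≤ st.2.2.2 →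
    ∑ i ∈ Finset.range ((st.2.2.2 + 1 - st.2.2.1).toNat + 1), cf st.1 i *
      sb bits (st.2.2.2.toNat - i) = 1
  hmin : ∀ L : Nat, Sol bits L N → st.2.2.1.toNat ≤ L

lemma AInvStep (bits : List Int) (N : Nat) (hNn : N < bits.length)
    (bA cA : List Int) (l m : Int) (h : AInv bits N (bA, cA, l, m)) :
    AInv bits (N + 1) (bmAStep bits bits.length (bA, cA, l, m) (N : Int)) := by
  obtain ⟨hblen, hclen, hb01, hc01, hb0, hc0, hl0, hlN, hm1, hmN, hml, hlpos, hlb0,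
    hcdeg, hbdeg, hcgen, hbgen, hbdisc, hmin⟩ := h
  dsimp only at hblen hclen hb01 hc01 hb0 hc0 hl0 hlN hm1 hmN hml hlpos hlb0 hcdeg hbdeg hcgen hbgen hbdisc hmin
  set lN := l.toNat with hlNdef
  have hlcast : l = (lN : Int) := by omega
  set S := ∑ i ∈ Finset.range (lN + 1), cf cA i * sb bits (N - i) with hSdef
  have hdval : (PySem.List.pyRange 0 (l + 1)).foldl
      (fun d i => PySem.Int.bxor d
        (PySem.Int.band (PySem.List.pyGetD cA i 0) (PySem.List.pyGetD bits ((N : Int) - i) 0))) 0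
      = z2i S := by
    rw [show l + 1 = ((lN + 1 : Nat) : Int) from by omega]
    exact innerA bits cA hc01 N (lN + 1) (by omega)
  simp only [bmAStep, hdval]
  have hfloor : (l ≤ PySem.Int.floordiv (N : Int) 2) ↔ 2 * l ≤ (N : Int) := by
    rw [PySem.Int.floordiv_eq_ediv_of_pos (by omega)]
    omega
  by_cases hS : S = 1
  case neg =>
    -- discrepancy 0: the state is unchanged
    have hS0 : S = 0 := by
      rcases (by decide : ∀ a : ZMod 2, a = 0 ∨ a = 1) S with h0 | h0
      · exact h0
      · exact absurd h0 hS
    rw [if_neg (by rw [hS0]; simp [z2i])]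
    exact {
      hblen := hblen, hclen := hclen, hb01 := hb01, hc01 := hc01, hb0 := hb0, hc0 := hc0
      hl0 := hl0, hlN := by dsimp only; push_cast; omega
      hm1 := hm1, hmN := by dsimp only; push_cast; omega
      hml := hml, hlpos := hlpos, hlb0 := hlb0, hcdeg := hcdeg, hbdeg := hbdeg
      hcgen := by
        intro k hk hkN
        rcases Nat.lt_or_ge k N with h2 | h2
        · exact hcgen k hk h2
        · have : k = N := by omega
          subst this
          exact hS0
      hbgen := hbgen, hbdisc := hbdisc
      hmin := fun L hsol => hmin L (sol_anti bits (by omega) hsol) }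
  case pos =>
    rw [if_pos (by rw [hS]; rfl)]
    have hp1 : 1 ≤ (N : Int) - m := by omega
    have hptn : ((N : Int) - m).toNat = N - m.toNat ∨ m = -1 := by omega
    -- characterization of the updated polynomial list c2
    have hc2both :
        ((PySem.List.pyRange 0 ((bits.length : Int) - ((N : Int) - m))).foldl
          (fun c i => c.set (i + ((N : Int) - m)).toNat
            (PySem.Int.bxor (PySem.List.pyGetD c (i + ((N : Int) - m)) 0)
              (PySem.List.pyGetD bA i 0))) cA).length = bits.length ∧
        ∀ j : Nat,
          ((PySem.List.pyRange 0 ((bits.length : Int) - ((N : Int) - m))).foldl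
            (fun c i => c.set (i + ((N : Int) - m)).toNat
              (PySem.Int.bxor (PySem.List.pyGetD c (i + ((N : Int) - m)) 0)
                (PySem.List.pyGetD bA i 0))) cA).getD j 0
          = if ((N : Int) - m).toNat ≤ j ∧ j < bits.length then
              PySem.Int.bxor (cA.getD j 0) (bA.getD (j - ((N : Int) - m).toNat) 0)
            else cA.getD j 0 := by
      by_cases hple : ((N : Int) - m).toNat ≤ bits.length
      · obtain ⟨h1, h2⟩ := updA_partial bA cA ((N : Int) - m) hp1
          (bits.length - ((N : Int) - m).toNat) (by omega)
        rw [show (bits.length : Int) - ((N : Int) - m)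
            = ((bits.length - ((N : Int) - m).toNat : Nat) : Int) from by omega]
        refine ⟨h1.trans hclen, fun j => ?_⟩
        rw [h2 j]
        by_cases hcond : ((N : Int) - m).toNat ≤ j ∧
            j < ((N : Int) - m).toNat + (bits.length - ((N : Int) - m).toNat)
        · rw [if_pos hcond, if_pos (by omega)]
        · rw [if_neg hcond, if_neg (by omega)]
      · rw [pyRange_nil (by omega : (bits.length : Int) - ((N : Int) - m) ≤ 0)]
        simp only [List.foldl_nil]
        exact ⟨hclen, fun j => by rw [if_neg (by omega)]⟩
    set c2 := (PySem.List.pyRange 0 ((bits.length : Int) - ((N : Int) - m))).foldl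
        (fun c i => c.set (i + ((N : Int) - m)).toNat
          (PySem.Int.bxor (PySem.List.pyGetD c (i + ((N : Int) - m)) 0)
            (PySem.List.pyGetD bA i 0))) cA with hc2def
    obtain ⟨hc2len, hc2get⟩ := hc2both
    set pn := ((N : Int) - m).toNat with hpndef
    -- GF(2) view of the update
    have hcf2 : ∀ j : Nat, cf c2 j
        = cf cA j + (if pn ≤ j ∧ j < bits.length then cf bA (j - pn) else 0) := by
      intro j
      unfold cf
      rw [hc2get j]
      by_cases hcond : pn ≤ j ∧ j < bits.length
      · rw [if_pos hcond, if_pos hcond]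
        rcases hc01 j with h1 | h1 <;> rcases hb01 (j - pn) with h2 | h2 <;>
          rw [h1, h2] <;> decide
      · rw [if_neg hcond, if_neg hcond, add_zero]
    have hE2 : E01 c2 := by
      intro j
      rw [hc2get j]
      by_cases hcond : pn ≤ j ∧ j < bits.length
      · rw [if_pos hcond]
        rcases hc01 j with h1 | h1 <;> rcases hb01 (j - pn) with h2 | h2 <;>
          rw [h1, h2] <;> decide
      · rw [if_neg hcond]
        exact hc01 j
    have hc20 : c2.getD 0 0 = 1 := by
      rw [hc2get 0, if_neg (by omega)]
      exact hc0
    have hcf0 : cf cA 0 = 1 := by unfold cf; rw [hc0]; norm_num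
    -- degree bound of c2 for any admissible new length l'
    have hcdeg2 : ∀ (l' : Int), l ≤ l' → (N : Int) + 1 - l ≤ l' →
        ∀ j : Nat, l' < (j : Int) → c2.getD j 0 = 0 := by
      intro l' hll' hNl' j hj
      rw [hc2get j]
      by_cases hcond : pn ≤ j ∧ j < bits.length
      · rw [if_pos hcond, hcdeg j (by omega), hbdeg (j - pn) (by omega)]
        decide
      · rw [if_neg hcond]
        exact hcdeg j (by omega)
    -- the generator property of the updated polynomial
    have genNew : ∀ (l' : Int), l ≤ l' → (N : Int) + 1 - l ≤ l' → 0 ≤ m →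
        ∀ k : Nat, l'.toNat ≤ k → k ≤ N →
        ∑ i ∈ Finset.range (l'.toNat + 1), cf c2 i * sb bits (k - i) = 0 := by
      intro l' hll' hNl' hm0 k hk1 hk2
      have hkn : k < bits.length := by omega
      set lb := (m + 1 - l).toNat with hlbdef
      rw [Finset.sum_congr rfl (fun i _ => by rw [hcf2 i, add_mul]), Finset.sum_add_distrib]
      have hfirst : ∑ i ∈ Finset.range (l'.toNat + 1), cf cA i * sb bits (k - i)
          = ∑ i ∈ Finset.range (lN + 1), cf cA i * sb bits (k - i) := by
        symm
        refine Finset.sum_subset (Finset.range_subset_range.2 (by omega)) ?_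
        intro i _ hi
        have hi' : ¬ i < lN + 1 := fun hc => hi (Finset.mem_range.2 hc)
        have : cf cA i = 0 := by
          unfold cf
          rw [hcdeg i (by omega)]
          norm_num
        rw [this, zero_mul]
      have hsecond : ∑ i ∈ Finset.range (l'.toNat + 1),
            (if pn ≤ i ∧ i < bits.length then cf bA (i - pn) else 0) * sb bits (k - i)
          = ∑ j ∈ Finset.range (lb + 1), cf bA j * sb bits ((k - pn) - j) := by
        rw [Finset.sum_congr rfl (fun i hi => by
          have hin : i < bits.length := by
            have := Finset.mem_range.1 hi; omega
          show (if pn ≤ i ∧ i < bits.length then cf bA (i - pn) else 0) * sb bits (k - i)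
            = if pn ≤ i then cf bA (i - pn) * sb bits ((k - pn) - (i - pn)) else 0
          by_cases hpi : pn ≤ i
          · rw [if_pos ⟨hpi, hin⟩, if_pos hpi]
            congr 2
            have := Finset.mem_range.1 hi
            omega
          · rw [if_neg (fun hc => hpi hc.1), if_neg hpi, zero_mul])]
        have hpl : pn ≤ l'.toNat + 1 := by omega
        rw [show l'.toNat + 1 = pn + (l'.toNat + 1 - pn) from by omega,
          sum_shift (fun j => cf bA j * sb bits ((k - pn) - j)) pn (l'.toNat + 1 - pn)]
        symm
        refine Finset.sum_subset (Finset.range_subset_range.2 (by omega)) ?_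
        intro j _ hj
        have hj' : ¬ j < lb + 1 := fun hc => hj (Finset.mem_range.2 hc)
        have : cf bA j = 0 := by
          unfold cf
          rw [hbdeg j (by omega)]
          norm_num
        rw [this, zero_mul]
      rw [hfirst, hsecond]
      rcases Nat.lt_or_ge k N with hkN | hkN
      · rw [hcgen k (by omega) hkN, hbgen (k - pn) hm0 (by omega) (by omega), add_zero]
      · have hkeq : k = N := by omega
        subst hkeq
        rw [show k - pn = m.toNat from by omega] at *
        rw [← hSdef] at *
        rw [hS, hbdisc hm0]
        decide
    by_cases hbr : l ≤ PySem.Int.floordiv (N : Int) 2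
    · rw [if_pos hbr]
      have h2l : 2 * l ≤ (N : Int) := hfloor.1 hbr
      have hlb' : ((N : Int) + 1 - ((N : Int) + 1 - l) : Int) = l := by ring
      refine {
        hblen := hclen, hclen := hc2len, hb01 := hc01, hc01 := hE2, hb0 := hc0, hc0 := hc20
        hl0 := by dsimp only; omega
        hlN := by dsimp only; push_cast; omega
        hm1 := by dsimp only; omega
        hmN := by dsimp only; push_cast; omega
        hml := by dsimp only; omega
        hlpos := by dsimp only; omega
        hlb0 := by dsimp only; omega
        hcdeg := fun j hj => hcdeg2 ((N : Int) + 1 - l) (by omega) (by omega) j hj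
        hbdeg := fun j hj => hcdeg j (by dsimp only at hj; omega)
        hcgen := ?_, hbgen := ?_, hbdisc := ?_, hmin := ?_ }
      · -- new c generates the first N+1 terms
        intro k hk1 hk2
        dsimp only at hk1 ⊢
        rcases Int.lt_or_le m 0 with hm0 | hm0
        · -- m = -1 : then l = 0 and the new length is N+1, nothing to check
          have hm1' : m = -1 := by omega
          have hl0' : l = 0 := hml hm1'
          omega
        · exact genNew ((N : Int) + 1 - l) (by omega) (by omega) hm0 k hk1 (by omega)
      · -- the old c generates the first N terms : b-part of the invariant
        intro k _ hk1 hk2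
        dsimp only at hk1 hk2 ⊢
        rw [hlb'] at hk1 ⊢
        exact hcgen k hk1 (by omega)
      · -- the old c has discrepancy 1 at N
        intro _
        dsimp only
        rw [hlb', show ((N : Int)).toNat = N from by omega]
        exact hS
      · -- minimality of N + 1 - l, by Massey's lemma
        intro L hsol
        dsimp only
        obtain ⟨t, ht⟩ := hsol
        have hmas := massey (sb bits) lN N (cf cA) hcf0 hcgen hS L t ht
        omega
    · rw [if_neg hbr]
      have h2l : ¬ 2 * l ≤ (N : Int) := fun hc => hbr (hfloor.2 hc)
      have hm0 : 0 ≤ m := by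
        rcases Int.lt_or_le m 0 with h0 | h0
        · have := hml (by omega)
          omega
        · exact h0
      refine {
        hblen := hblen, hclen := hc2len, hb01 := hb01, hc01 := hE2, hb0 := hb0, hc0 := hc20
        hl0 := hl0
        hlN := by dsimp only; push_cast; omega
        hm1 := hm1
        hmN := by dsimp only; push_cast; omega
        hml := by dsimp only; omega
        hlpos := hlpos
        hlb0 := hlb0
        hcdeg := fun j hj => hcdeg2 l (le_refl l) (by omega) j hj
        hbdeg := hbdeg
        hcgen := ?_
        hbgen := hbgen, hbdisc := hbdisc, hmin := ?_ }
      · intro k hk1 hk2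
        dsimp only at hk1 ⊢
        exact genNew l (le_refl l) (by omega) hm0 k hk1 (by omega)
      · intro L hsol
        exact hmin L (sol_anti bits (by omega) hsol)

lemma AInit (bits : List Int) (hne : bits ≠ []) :
    AInv bits 0 ((List.replicate bits.length (0 : Int)).set 0 1,
      (List.replicate bits.length (0 : Int)).set 0 1, 0, -1) := by
  have hn : 0 < bits.length := List.length_pos_iff.2 hne
  have hget : ∀ j : Nat, ((List.replicate bits.length (0 : Int)).set 0 1).getD j 0
      = if j = 0 then 1 else 0 := by
    intro j
    rw [List.getD_eq_getElem?_getD, List.getElem?_set]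
    by_cases hj : j = 0
    · subst hj
      rw [if_pos rfl, if_pos rfl, if_pos (by simpa using hn)]
      rfl
    · rw [if_neg (fun h => hj h.symm), if_neg hj, List.getElem?_replicate]
      by_cases hjn : j < bits.length
      · rw [if_pos hjn]; rfl
      · rw [if_neg hjn]; rfl
  refine {
    hblen := by simp
    hclen := by simp
    hb01 := fun j => by rw [hget j]; split_ifs <;> norm_num
    hc01 := fun j => by rw [hget j]; split_ifs <;> norm_num
    hb0 := by rw [hget 0, if_pos rfl]
    hc0 := by rw [hget 0, if_pos rfl]
    hl0 := le_refl 0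
    hlN := by norm_num
    hm1 := le_refl (-1)
    hmN := by norm_num
    hml := fun _ => rfl
    hlpos := fun h => absurd h (by norm_num)
    hlb0 := by norm_num
    hcdeg := fun j hj => by dsimp only at hj; rw [hget j, if_neg (by omega)]
    hbdeg := fun j hj => by dsimp only at hj; rw [hget j, if_neg (by omega)]
    hcgen := fun k hk hk2 => absurd hk2 (by omega)
    hbgen := fun k h _ _ => absurd h (by norm_num)
    hbdisc := fun h => absurd h (by norm_num)
    hmin := fun L _ => by norm_num }

lemma AFold (bits : List Int) (hne : bits ≠ []) :
    ∀ t : Nat, t ≤ bits.length →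
    AInv bits t
      ((PySem.List.pyRange 0 (t : Int)).foldl (bmAStep bits bits.length)
        ((List.replicate bits.length (0 : Int)).set 0 1,
          (List.replicate bits.length (0 : Int)).set 0 1, 0, -1)) := by
  intro t
  induction t with
  | zero => intro _; exact AInit bits hne
  | succ t ih =>
      intro hle
      have h1 : ((t + 1 : Nat) : Int) = (t : Int) + 1 := by push_cast; ring
      rw [h1, PySem.List.pyRange_one_succ_right (by positivity), List.foldl_append]
      exact AInvStep bits t (by omega) _ _ _ _ (ih (by omega))

lemma A_eq_lc (bits : List Int) (hne : bits ≠ []) :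
    berlekamp_massey bits = (lcN bits : Int) := by
  have h := AFold bits hne bits.length (le_refl _)
  set st := (PySem.List.pyRange 0 (bits.length : Int)).foldl (bmAStep bits bits.length)
    ((List.replicate bits.length (0 : Int)).set 0 1,
      (List.replicate bits.length (0 : Int)).set 0 1, 0, -1) with hst
  have hsol : Sol bits st.2.2.1.toNat bits.length := by
    refine gen_sol bits st.2.1 st.2.2.1.toNat bits.length ?_ h.hcgen
    unfold cf
    rw [h.hc0]
    norm_num
  have hle : lcN bits ≤ st.2.2.1.toNat := Nat.sInf_le hsol
  have hge : st.2.2.1.toNat ≤ lcN bits := h.hmin (lcN bits) (lcN_sol bits)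
  have : st.2.2.1.toNat = lcN bits := by omega
  show st.2.2.1 = (lcN bits : Int)
  have hl0 := h.hl0
  omega

-- ===== B side =====
def sMap (bits : List Int) : List Int := bits.map (fun x => PySem.Int.band x 1)

lemma sMap_getD (bits : List Int) (k : Nat) : (sMap bits).getD k 0 = (nb bits k : Int) := by
  unfold sMap
  rcases Nat.lt_or_ge k bits.length with h | h
  · rw [List.getD_eq_getElem?_getD, List.getElem?_map]
    rw [List.getElem?_eq_getElem h]
    simp only [Option.map_some, Option.getD_some]
    rw [show bits[k] = bits.getD k 0 from (List.getD_eq_getElem bits 0 h).symm]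
    exact band_one_eq_nb bits k
  · rw [List.getD_eq_getElem?_getD, List.getElem?_eq_none (by simpa using h)]
    have : bits.getD k 0 = 0 := List.getD_eq_default _ _ (by simpa using h)
    unfold nb
    rw [this]
    decide

-- the row built by Source B's inner for-loop
def rowOf (s : List Int) (l : Nat) (N : Int) : Nat :=
  (PySem.List.pyRange 1 ((l : Int) + 1)).foldl
    (fun row i => row ||| ((PySem.List.pyGetD s (N - i) 0).toNat <<< (i - 1).toNat)) 0

lemma testBit_of_le_one {x : Nat} (hx : x ≤ 1) (q : Nat) :
    x.testBit q = (decide (q = 0) && decide (x = 1)) := by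
  interval_cases x
  · simp
  · rcases q with _ | q
    · simp
    · simp [Nat.testBit_succ]

lemma rowOf_testBit (bits : List Int) (l k : Nat) (hlk : l ≤ k) :
    ∀ q : Nat, (rowOf (sMap bits) l (k : Int)).testBit q
      = (decide (q < l) && decide (nb bits (k - 1 - q) = 1)) := by
  unfold rowOf
  suffices h : ∀ K : Nat, K ≤ l → ∀ q : Nat,
      ((PySem.List.pyRange 1 ((K : Int) + 1)).foldl
        (fun row i => row ||| ((PySem.List.pyGetD (sMap bits) ((k : Int) - i) 0).toNat
          <<< (i - 1).toNat)) 0).testBit q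
      = (decide (q < K) && decide (nb bits (k - 1 - q) = 1)) by
    exact h l (le_refl l)
  intro K
  induction K with
  | zero =>
      intro _ q
      rw [Nat.cast_zero, zero_add, pyRange_nil (le_refl (1 : Int))]
      simp
  | succ K ih =>
      intro hK q
      have h1 : ((K + 1 : Nat) : Int) + 1 = (K : Int) + 1 + 1 := by push_cast; ring
      rw [h1, PySem.List.pyRange_one_succ_right (by omega), List.foldl_append]
      simp only [List.foldl_cons, List.foldl_nil]
      rw [Nat.testBit_lor, ih (by omega) q]
      have he : (k : Int) - ((K : Int) + 1) = ((k - (K + 1) : Nat) : Int) := by omega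
      have he2 : ((K : Int) + 1 - 1).toNat = K := by omega
      rw [he, PySem.List.pyGetD_natCast, he2, sMap_getD]
      rw [show ((nb bits (k - (K + 1)) : Int)).toNat = nb bits (k - (K + 1)) from by omega]
      rw [Nat.testBit_shiftLeft, testBit_of_le_one (nb_le_one bits (k - (K + 1))) (q - K)]
      rcases Nat.lt_trichotomy q K with hq | hq | hq
      · have d1 : decide (q < K) = true := by simpa using hq
        have d2 : decide (K ≤ q) = false := by simpa using hq
        rw [d1, d2]
        simp only [Bool.true_and, Bool.false_and, Bool.or_false]
        have : decide (q < K + 1) = true := by simp; omega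
        rw [this, Bool.true_and]
      · subst hq
        have d1 : decide (q < q) = false := by simp
        have d2 : decide (q ≤ q) = true := by simp
        have d3 : decide (q - q = 0) = true := by simp
        rw [d1, d2, d3]
        simp only [Bool.false_and, Bool.true_and, Bool.false_or]
        have : decide (q < q + 1) = true := by simp
        rw [this, Bool.true_and]
        have : k - 1 - q = k - (q + 1) := by omega
        rw [this]
      · have d1 : decide (q < K) = false := by simp; omega
        have d2 : decide (q < K + 1) = false := by simp; omega
        have d3 : decide (q - K = 0) = false := by simp; omega
        rw [d1, d2, d3]
        simp

-- the GF(2) value of an augmented row under a candidate tap assignment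
def rv (t : Nat → ZMod 2) (l : Nat) (r y : Nat) : ZMod 2 :=
  (∑ q ∈ Finset.range l, t q * (if r.testBit q then 1 else 0)) + (y : ZMod 2)

-- well-formed pivot table: entry at p has leading bit p and a 0/1 right-hand side
def PivP (l : Nat) (piv : List (Option (Nat × Nat))) : Prop :=
  piv.length = l ∧ ∀ p r y, p < l → piv.getD p none = some (r, y) →
    r.testBit p = true ∧ (∀ q, p < q → r.testBit q = false) ∧ y ≤ 1

-- t satisfies every pivot equation
def SatPiv (t : Nat → ZMod 2) (l : Nat) (piv : List (Option (Nat × Nat))) : Prop :=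
  ∀ p r y, p < l → piv.getD p none = some (r, y) → rv t l r y = 0

lemma cast_xor_le_one {x y : Nat} (hx : x ≤ 1) (hy : y ≤ 1) :
    ((x ^^^ y : Nat) : ZMod 2) = (x : ZMod 2) + (y : ZMod 2) := by
  interval_cases x <;> interval_cases y <;> decide

lemma mul_ite_xor (tq : ZMod 2) (u v : Bool) :
    tq * (if (u.xor v) then 1 else 0) = tq * (if u then 1 else 0) + tq * (if v then 1 else 0) := by
  cases u <;> cases v <;> simp
  exact (z2_addSelf tq).symm

lemma rv_xor (t : Nat → ZMod 2) (l : Nat) (a b x y : Nat) (hx : x ≤ 1) (hy : y ≤ 1) :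
    rv t l (a ^^^ b) (x ^^^ y) = rv t l a x + rv t l b y := by
  unfold rv
  have hsum : ∑ q ∈ Finset.range l, t q * (if (a ^^^ b).testBit q then 1 else 0)
      = ∑ q ∈ Finset.range l, (t q * (if a.testBit q then 1 else 0)
        + t q * (if b.testBit q then 1 else 0)) :=
    Finset.sum_congr rfl (fun q _ => by rw [Nat.testBit_xor]; exact mul_ite_xor (t q) _ _)
  rw [cast_xor_le_one hx hy, hsum, Finset.sum_add_distrib]
  ring

lemma rv_zero (t : Nat → ZMod 2) (l y : Nat) : rv t l 0 y = (y : ZMod 2) := by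
  unfold rv
  rw [Finset.sum_eq_zero (fun q _ => by rw [Nat.zero_testBit]; simp), zero_add]

lemma ite_eq_sb (bits : List Int) (j : Nat) :
    (if nb bits j = 1 then (1 : ZMod 2) else 0) = sb bits j := by
  unfold sb
  have := nb_le_one bits j
  interval_cases h : nb bits j
  · norm_num
  · norm_num

-- the row equation says exactly that the taps t reproduce term k
lemma rv_row (bits : List Int) (t : Nat → ZMod 2) (l k : Nat) (hlk : l ≤ k) :
    (rv t l (rowOf (sMap bits) l (k : Int)) (nb bits k) = 0)
      ↔ sb bits k = ∑ i ∈ Finset.range l, t i * sb bits (k - 1 - i) := by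
  unfold rv
  have hsum : ∑ q ∈ Finset.range l,
        t q * (if (rowOf (sMap bits) l (k : Int)).testBit q then 1 else 0)
      = ∑ q ∈ Finset.range l, t q * sb bits (k - 1 - q) := by
    refine Finset.sum_congr rfl (fun q hq => ?_)
    rw [rowOf_testBit bits l k hlk q]
    have hql : q < l := Finset.mem_range.1 hq
    have d1 : decide (q < l) = true := by simpa using hql
    rw [d1, Bool.true_and]
    show t q * (if decide (nb bits (k - 1 - q) = 1) = true then 1 else 0)
      = t q * sb bits (k - 1 - q)
    simp only [decide_eq_true_eq]
    rw [ite_eq_sb]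
  rw [hsum, show ((nb bits k : Nat) : ZMod 2) = sb bits k from rfl, z2_addZero _ _]
  exact eq_comm

lemma getD_set_self (piv : List (Option (Nat × Nat))) (p : Nat) (e : Option (Nat × Nat))
    (hp : p < piv.length) : (piv.set p e).getD p none = e := by
  rw [List.getD_eq_getElem?_getD, List.getElem?_set_self (by omega)]
  rfl

lemma getD_set_ne (piv : List (Option (Nat × Nat))) (p q : Nat) (e : Option (Nat × Nat))
    (hne : p ≠ q) : (piv.set p e).getD q none = piv.getD q none := by
  rw [List.getD_eq_getElem?_getD, List.getElem?_set_ne hne, ← List.getD_eq_getElem?_getD]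

lemma guard_testBit (row p : Nat) : ((row >>> p) &&& 1 = 0) ↔ row.testBit p = false := by
  rw [Nat.and_one_is_mod, ← Nat.decide_shiftRight_mod_two_eq_one]
  rcases Nat.mod_two_eq_zero_or_one (row >>> p) with h | h <;> rw [h] <;> simp

-- full specification of the inner while loop
lemma reduce_spec (l : Nat) :
    ∀ (k : Nat) (piv : List (Option (Nat × Nat))) (row rhs : Nat),
    k ≤ l → PivP l piv → (∀ q, k ≤ q → row.testBit q = false) → rhs ≤ 1 →
    PivP l (bmReduce piv row rhs k).1 ∧ (bmReduce piv row rhs k).2.2.1 ≤ 1 ∧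
    (∀ t, SatPiv t l piv →
      rv t l (bmReduce piv row rhs k).2.1 (bmReduce piv row rhs k).2.2.1 = rv t l row rhs) ∧
    ((bmReduce piv row rhs k).2.2.2 = false →
      (bmReduce piv row rhs k).1 = piv ∧ (bmReduce piv row rhs k).2.1 = 0) ∧
    ((bmReduce piv row rhs k).2.2.2 = true → ∃ p, p < k ∧ piv.getD p none = none ∧
      (bmReduce piv row rhs k).1
        = piv.set p (some ((bmReduce piv row rhs k).2.1, (bmReduce piv row rhs k).2.2.1))) := by
  intro k
  induction k with
  | zero =>
      intro piv row rhs _ hpiv hrow hrhs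
      have hrow0 : row = 0 :=
        Nat.eq_of_testBit_eq (fun q => by rw [hrow q (by omega), Nat.zero_testBit])
      exact ⟨hpiv, hrhs, fun t _ => rfl, fun _ => ⟨rfl, hrow0⟩,
        fun h => absurd h (by simp [bmReduce])⟩
  | succ p ih =>
      intro piv row rhs hk hpiv hrow hrhs
      by_cases hbit : (row >>> p) &&& 1 = 0
      · have hb : row.testBit p = false := (guard_testBit row p).1 hbit
        have hred : bmReduce piv row rhs (p + 1) = bmReduce piv row rhs p := by
          simp only [bmReduce, if_pos hbit]
        rw [hred]
        obtain ⟨ih1, ih2, ih3, ih4, ih5⟩ := ih piv row rhs (by omega) hpiv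
          (fun q hq => by
            rcases Nat.eq_or_lt_of_le hq with h1 | h1
            · rw [← h1]; exact hb
            · exact hrow q h1) hrhs
        refine ⟨ih1, ih2, ih3, ih4, fun h => ?_⟩
        obtain ⟨p', hp1, hp2, hp3⟩ := ih5 h
        exact ⟨p', by omega, hp2, hp3⟩
      · have hb : row.testBit p = true := by
          rcases Bool.eq_false_or_eq_true (row.testBit p) with h1 | h1
          · exact h1
          · exact absurd ((guard_testBit row p).2 h1) hbit
        cases hgd : piv.getD p none with
        | none =>
            have hred : bmReduce piv row rhs (p + 1) = (piv.set p (some (row, rhs)), row, rhs, true) := by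
              simp only [bmReduce, if_neg hbit, hgd]
            rw [hred]
            refine ⟨⟨by simpa using hpiv.1, ?_⟩, hrhs, fun t _ => rfl,
              fun h => by simp at h, fun _ => ⟨p, by omega, hgd, rfl⟩⟩
            intro p' r y hp' hgd'
            by_cases hpp : p = p'
            · subst hpp
              rw [getD_set_self piv p _ (by rw [hpiv.1]; omega)] at hgd'
              cases hgd'
              exact ⟨hb, fun q hq => hrow q (by omega), hrhs⟩
            · rw [getD_set_ne piv p p' _ hpp] at hgd'
              exact hpiv.2 p' r y hp' hgd'
        | some e =>
            obtain ⟨r2, y2⟩ := e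
            have hred : bmReduce piv row rhs (p + 1) = bmReduce piv (row ^^^ r2) (rhs ^^^ y2) p := by
              simp only [bmReduce, if_neg hbit, hgd]
            rw [hred]
            obtain ⟨hr2p, hr2hi, hy2⟩ := hpiv.2 p r2 y2 (by omega) hgd
            have hrow' : ∀ q, p ≤ q → (row ^^^ r2).testBit q = false := by
              intro q hq
              rw [Nat.testBit_xor]
              rcases Nat.eq_or_lt_of_le hq with h1 | h1
              · rw [← h1, hb, hr2p]; rfl
              · rw [hrow q h1, hr2hi q h1]; rfl
            obtain ⟨ih1, ih2, ih3, ih4, ih5⟩ := ih piv (row ^^^ r2) (rhs ^^^ y2) (by omega) hpiv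
              hrow' (by
                have : rhs ^^^ y2 ≤ 1 := by
                  interval_cases rhs <;> interval_cases y2 <;> decide
                exact this)
            refine ⟨ih1, ih2, ?_, ih4, fun h => ?_⟩
            · intro t hsat
              rw [ih3 t hsat, rv_xor t l row r2 rhs y2 hrhs hy2,
                hsat p r2 y2 (by omega) hgd, add_zero]
            · obtain ⟨p', hp1, hp2, hp3⟩ := ih5 h
              exact ⟨p', by omega, hp2, hp3⟩

-- back-substitution: solve the triangular pivot system bottom-up
def solveAux (piv : List (Option (Nat × Nat))) : Nat → List (ZMod 2)
  | 0 => []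
  | p + 1 =>
      let prev := solveAux piv p
      prev ++ [match piv.getD p none with
        | some (r, y) => (y : ZMod 2)
            + ∑ q ∈ Finset.range p, (prev.getD q 0) * (if r.testBit q then 1 else 0)
        | none => 0]

lemma solveAux_len (piv : List (Option (Nat × Nat))) : ∀ p, (solveAux piv p).length = p := by
  intro p
  induction p with
  | zero => rfl
  | succ p ih => simp [solveAux, ih]

def tstar (piv : List (Option (Nat × Nat))) (q : Nat) : ZMod 2 :=
  (solveAux piv (q + 1)).getD q 0

lemma solveAux_stable (piv : List (Option (Nat × Nat))) :
    ∀ P q, q < P → (solveAux piv P).getD q 0 = tstar piv q := by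
  intro P
  induction P with
  | zero => intro q hq; omega
  | succ P ih =>
      intro q hq
      rcases Nat.lt_or_ge q P with h1 | h1
      · show (solveAux piv P ++ [_]).getD q 0 = tstar piv q
        rw [List.getD_eq_getElem?_getD, List.getElem?_append_left (by rw [solveAux_len]; omega),
          ← List.getD_eq_getElem?_getD]
        exact ih q h1
      · have hq' : q = P := by omega
        subst hq'
        rfl

lemma tstar_sat (l : Nat) (piv : List (Option (Nat × Nat))) (hpiv : PivP l piv) :
    SatPiv (tstar piv) l piv := by
  intro p r y hp hgd
  obtain ⟨hbp, hhi, hy⟩ := hpiv.2 p r y hp hgd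
  unfold rv
  have hsplit : ∑ q ∈ Finset.range l, tstar piv q * (if r.testBit q then 1 else 0)
      = ∑ q ∈ Finset.range (p + 1), tstar piv q * (if r.testBit q then 1 else 0) := by
    symm
    refine Finset.sum_subset (Finset.range_subset_range.2 (by omega)) ?_
    intro q _ hq
    have hq' : ¬ q < p + 1 := fun hc => hq (Finset.mem_range.2 hc)
    rw [hhi q (by omega)]
    simp
  rw [hsplit, Finset.sum_range_succ, hbp, if_pos rfl, mul_one]
  have htp : tstar piv p = (y : ZMod 2)
      + ∑ q ∈ Finset.range p, tstar piv q * (if r.testBit q then 1 else 0) := by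
    show (solveAux piv (p + 1)).getD p 0 = _
    have : solveAux piv (p + 1) = solveAux piv p ++ [match piv.getD p none with
        | some (r, y) => (y : ZMod 2)
            + ∑ q ∈ Finset.range p, ((solveAux piv p).getD q 0) * (if r.testBit q then 1 else 0)
        | none => 0] := rfl
    rw [this, List.getD_eq_getElem?_getD,
      List.getElem?_append_right (by rw [solveAux_len])]
    rw [solveAux_len]
    simp only [Nat.sub_self, List.getElem?_cons_zero, Option.getD_some]
    rw [hgd]
    dsimp only
    have hsc : ∑ q ∈ Finset.range p, ((solveAux piv p).getD q 0) * (if r.testBit q then 1 else 0)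
        = ∑ q ∈ Finset.range p, tstar piv q * (if r.testBit q then 1 else 0) :=
      Finset.sum_congr rfl (fun q hq => by
        rw [solveAux_stable piv p q (Finset.mem_range.1 hq)])
    rw [hsc]
  rw [htp]
  ring_nf
  have h2 : ∀ a : ZMod 2, a * 2 = 0 := by decide
  rw [h2, h2, add_zero]

def RowEq (bits : List Int) (l : Nat) (t : Nat → ZMod 2) (j : Nat) : Prop :=
  sb bits j = ∑ i ∈ Finset.range l, t i * sb bits (j - 1 - i)

lemma rhs_eq_nb (bits : List Int) (k : Nat) :
    (PySem.List.pyGetD (sMap bits) (k : Int) 0).toNat = nb bits k := by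
  rw [PySem.List.pyGetD_natCast, sMap_getD]
  omega

lemma consRows_spec (bits : List Int) (l : Nat) :
    ∀ (fuel : Nat) (k : Nat) (piv : List (Option (Nat × Nat))),
    l ≤ k → k ≤ bits.length → bits.length - k ≤ fuel → PivP l piv →
    ((bmConsRows (sMap bits) l piv (PySem.List.pyRange (k : Int) (bits.length : Int)) = true →
       ∃ pf, PivP l pf ∧ ∀ t, SatPiv t l pf →
         SatPiv t l piv ∧ ∀ j, k ≤ j → j < bits.length → RowEq bits l t j) ∧
     (bmConsRows (sMap bits) l piv (PySem.List.pyRange (k : Int) (bits.length : Int)) = false →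
       ∀ t, SatPiv t l piv → ¬ (∀ j, k ≤ j → j < bits.length → RowEq bits l t j))) := by
  intro fuel
  induction fuel with
  | zero =>
      intro k piv hlk hkn hfuel hpiv
      have hk : k = bits.length := by omega
      subst hk
      rw [pyRange_nil (le_refl _)]
      exact ⟨fun _ => ⟨piv, hpiv, fun t ht => ⟨ht, fun j hj1 hj2 => by omega⟩⟩,
        fun hfalse => by simp [bmConsRows] at hfalse⟩
  | succ fuel ih =>
      intro k piv hlk hkn hfuel hpiv
      rcases Nat.eq_or_lt_of_le hkn with hk | hk
      · subst hk
        rw [pyRange_nil (le_refl _)]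
        exact ⟨fun _ => ⟨piv, hpiv, fun t ht => ⟨ht, fun j hj1 hj2 => by omega⟩⟩,
          fun hfalse => by simp [bmConsRows] at hfalse⟩
      · rw [PySem.List.pyRange_one_cons (by exact_mod_cast hk),
          show (k : Int) + 1 = ((k + 1 : Nat) : Int) from by push_cast; ring]
        simp only [bmConsRows]
        rw [rhs_eq_nb bits k]
        rw [show List.foldl (fun row i => row |||
              (PySem.List.pyGetD (sMap bits) ((k : Int) - i) 0).toNat <<< (i - 1).toNat) 0
              (PySem.List.pyRange 1 ((l : Int) + 1)) = rowOf (sMap bits) l (k : Int) from rfl]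
        set row := rowOf (sMap bits) l (k : Int) with hrowdef
        set res := bmReduce piv row (nb bits k) l with hresdef
        have hrowhi : ∀ q, l ≤ q → row.testBit q = false := by
          intro q hq
          rw [hrowdef]
          rw [rowOf_testBit bits l k hlk q]
          have : decide (q < l) = false := by simp; omega
          rw [this, Bool.false_and]
        obtain ⟨R1, R2, R3, R4, R5⟩ := reduce_spec l l piv row (nb bits k) (le_refl l) hpiv
          hrowhi (nb_le_one bits k)
        rw [← hresdef] at R1 R2 R3 R4 R5
        cases hbroke : res.2.2.2 with
        | false =>
            obtain ⟨hpeq, hrow0⟩ := R4 hbroke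
            rcases Nat.eq_or_lt_of_le R2 with hy1 | hy1
            · -- inconsistent row 0 = 1 : the whole check is false
              rw [hy1]
              simp only [Bool.not_false, Bool.true_and, decide_true, if_true]
              refine ⟨fun h => by simp at h, fun _ t ht hrows => ?_⟩
              have h0 : rv t l row (nb bits k) = 0 :=
                (rv_row bits t l k hlk).2 (hrows k (le_refl k) (by omega))
              have h1 := R3 t ht
              rw [h0, hrow0, hy1, rv_zero] at h1
              exact absurd h1 (by decide)
            · have hy0 : res.2.2.1 = 0 := by omega
              rw [hy0]
              simp only [Bool.not_false, Bool.true_and, decide_eq_true_eq]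
              rw [if_neg (by omega)]
              rw [hpeq]
              obtain ⟨ih1, ih2⟩ := ih (k + 1) piv (by omega) (by omega) (by omega) hpiv
              have hval : ∀ t, SatPiv t l piv → rv t l row (nb bits k) = 0 := by
                intro t ht
                have h1 := R3 t ht
                rw [hrow0, hy0, rv_zero] at h1
                rw [← h1]
                rfl
              refine ⟨fun h => ?_, fun h t ht hrows => ?_⟩
              · obtain ⟨pf, pfP, hf⟩ := ih1 h
                refine ⟨pf, pfP, fun t ht => ?_⟩
                obtain ⟨hsp, hrows⟩ := hf t ht
                refine ⟨hsp, fun j hj1 hj2 => ?_⟩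
                rcases Nat.eq_or_lt_of_le hj1 with hj | hj
                · subst hj
                  exact (rv_row bits t l k hlk).1 (hval t hsp)
                · exact hrows j (by omega) hj2
              · exact ih2 h t ht (fun j hj1 hj2 => hrows j (by omega) hj2)
        | true =>
            obtain ⟨p, hpl, hpnone, hpset⟩ := R5 hbroke
            simp only [Bool.not_true, Bool.false_and, Bool.false_eq_true, if_false]
            have hup : ∀ t, SatPiv t l res.1 → SatPiv t l piv := by
              intro t hs p' r y hp' hgd'
              by_cases hpp : p = p'
              · subst hpp
                rw [hpnone] at hgd'
                cases hgd'
              · refine hs p' r y hp' ?_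
                rw [hpset, getD_set_ne piv p p' _ hpp]
                exact hgd'
            have hvnew : ∀ t, SatPiv t l res.1 → rv t l row (nb bits k) = 0 := by
              intro t hs
              have hpx : res.1.getD p none = some (res.2.1, res.2.2.1) := by
                rw [hpset]
                exact getD_set_self piv p _ (by rw [hpiv.1]; omega)
              have h1 := hs p res.2.1 res.2.2.1 (by omega) hpx
              rw [R3 t (hup t hs)] at h1
              exact h1
            have hdown : ∀ t, SatPiv t l piv → rv t l row (nb bits k) = 0 →
                SatPiv t l res.1 := by
              intro t ht hv p' r y hp' hgd'
              by_cases hpp : p = p'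
              · subst hpp
                rw [hpset, getD_set_self piv p _ (by rw [hpiv.1]; omega)] at hgd'
                cases hgd'
                rw [R3 t ht]
                exact hv
              · rw [hpset, getD_set_ne piv p p' _ hpp] at hgd'
                exact ht p' r y hp' hgd'
            obtain ⟨ih1, ih2⟩ := ih (k + 1) res.1 (by omega) (by omega) (by omega) R1
            refine ⟨fun h => ?_, fun h t ht hrows => ?_⟩
            · obtain ⟨pf, pfP, hf⟩ := ih1 h
              refine ⟨pf, pfP, fun t ht => ?_⟩
              obtain ⟨hsp, hrows⟩ := hf t ht
              refine ⟨hup t hsp, fun j hj1 hj2 => ?_⟩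
              rcases Nat.eq_or_lt_of_le hj1 with hj | hj
              · subst hj
                exact (rv_row bits t l k hlk).1 (hvnew t hsp)
              · exact hrows j (by omega) hj2
            · have hs' : SatPiv t l res.1 :=
                hdown t ht ((rv_row bits t l k hlk).2 (hrows k (le_refl k) (by omega)))
              exact ih2 h t hs' (fun j hj1 hj2 => hrows j (by omega) hj2)

lemma getD_replicate_none (l p : Nat) :
    (List.replicate l (none : Option (Nat × Nat))).getD p none = none := by
  rw [List.getD_eq_getElem?_getD, List.getElem?_replicate]
  split_ifs <;> rfl

lemma consistent_iff (bits : List Int) (l : Nat) (hln : l ≤ bits.length) :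
    bmConsistent (sMap bits) bits.length l = true ↔ Sol bits l bits.length := by
  have hinitP : PivP l (List.replicate l none) := by
    refine ⟨List.length_replicate, fun p r y hp hgd => ?_⟩
    rw [getD_replicate_none] at hgd
    cases hgd
  have hinitS : ∀ t, SatPiv t l (List.replicate l none) := by
    intro t p r y hp hgd
    rw [getD_replicate_none] at hgd
    cases hgd
  obtain ⟨h1, h2⟩ := consRows_spec bits l (bits.length - l) l (List.replicate l none)
    (le_refl l) hln (le_refl _) hinitP
  constructor
  · intro htrue
    obtain ⟨pf, pfP, hf⟩ := h1 htrue
    obtain ⟨_, hrows⟩ := hf (tstar pf) (tstar_sat l pf pfP)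
    exact ⟨tstar pf, fun k hk hk2 => hrows k hk hk2⟩
  · intro ⟨t, ht⟩
    cases hb : bmConsistent (sMap bits) bits.length l with
    | false =>
        exact absurd (fun j hj1 hj2 => ht j hj1 hj2) (h2 hb t (hinitS t))
    | true => rfl

lemma bmSearch_spec (bits : List Int) :
    ∀ (fuel : Nat) (lo hi : Int), 0 ≤ lo → hi ≤ (bits.length : Int) → lo ≤ hi →
    (hi - lo).toNat ≤ fuel → lo ≤ (lcN bits : Int) → (lcN bits : Int) ≤ hi →
    bmSearch (sMap bits) bits.length fuel lo hi = (lcN bits : Int) := by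
  intro fuel
  induction fuel with
  | zero =>
      intro lo hi h0 hn hlh hfuel hlo hhi
      have : lo = hi := by omega
      simp only [bmSearch]
      omega
  | succ fuel ih =>
      intro lo hi h0 hn hlh hfuel hlo hhi
      simp only [bmSearch]
      by_cases hlt : lo < hi
      · rw [if_pos hlt]
        have hmid := PySem.Int.floordiv_eq_ediv_of_pos
          (a := lo + hi) (b := 2) (by omega)
        have hmid1 : lo ≤ PySem.Int.floordiv (lo + hi) 2
            ∧ PySem.Int.floordiv (lo + hi) 2 < hi := by rw [hmid]; omega
        set mid := PySem.Int.floordiv (lo + hi) 2 with hmiddef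
        have hmidn : mid.toNat ≤ bits.length := by omega
        by_cases hcons : bmConsistent (sMap bits) bits.length mid.toNat = true
        · rw [if_pos hcons]
          have hsol : Sol bits mid.toNat bits.length := (consistent_iff bits _ hmidn).1 hcons
          have hle : lcN bits ≤ mid.toNat := Nat.sInf_le hsol
          exact ih lo mid (by omega) (by omega) (by omega) (by omega) hlo (by omega)
        · rw [if_neg hcons]
          have hgt : mid < (lcN bits : Int) := by
            by_contra hcon
            have h1 : lcN bits ≤ mid.toNat := by omega
            have h2 : Sol bits mid.toNat bits.length := sol_mono bits h1 (lcN_sol bits)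
            exact hcons ((consistent_iff bits _ hmidn).2 h2)
          exact ih (mid + 1) hi (by omega) hn (by omega) (by omega) (by omega) hhi
      · rw [if_neg hlt]
        omega

lemma B_eq_lc (bits : List Int) :
    berlekamp_massey_alt bits = (lcN bits : Int) := by
  show bmSearch (sMap bits) bits.length bits.length 0 (bits.length : Int) = (lcN bits : Int)
  refine bmSearch_spec bits bits.length 0 (bits.length : Int) (le_refl 0) (le_refl _)
    (by omega) (by omega) (by omega) ?_
  have := lcN_le_len bits
  omega

-- ===== VERDICT (by name: the statement is the Claim_ definition above) =====
theorem berlekamp_massey_spec : Claim_equal_berlekamp_massey := by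
  intro bits _ hpre
  unfold Spec_berlekamp_massey
  rw [A_eq_lc bits hpre, B_eq_lc bits]
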